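-- pv_equiv track=rewrite | github.com/Iribala/town-builder | app/services/scene_description.py | calculate_scene_bounds
-- ===== SOURCE A (Python) =====
-- from typing import Any
--
-- def calculate_scene_bounds(all_positions: list[tuple]) -> dict[str, Any]:
--     """Calculate the bounds of the scene.
--
--     Args:
--         all_positions: List of (x, y, z) tuples
--
--     Returns:
--         Dictionary with min/max coordinates and dimensions
--     """
--     if not all_positions:
--         return {
--             "min": {"x": 0, "y": 0, "z": 0},
--             "max": {"x": 0, "y": 0, "z": 0},
--             "dimensions": {"width": 0, "height": 0, "depth": 0},
--         }
--
--     xs = [pos[0] for pos in all_positions]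
--     ys = [pos[1] for pos in all_positions]
--     zs = [pos[2] for pos in all_positions]
--
--     min_x, max_x = min(xs), max(xs)
--     min_y, max_y = min(ys), max(ys)
--     min_z, max_z = min(zs), max(zs)
--
--     return {
--         "min": {"x": min_x, "y": min_y, "z": min_z},
--         "max": {"x": max_x, "y": max_y, "z": max_z},
--         "dimensions": {
--             "width": max_x - min_x,
--             "height": max_y - min_y,
--             "depth": max_z - min_z,
--         },
--     }
-- ===== SOURCE B (Python) =====
-- def calculate_scene_bounds(all_positions: list[tuple]) -> dict:
--     """Single pass: seed six extrema from the first point, update with direct comparisons."""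
--     if not all_positions:
--         return {
--             "min": {"x": 0, "y": 0, "z": 0},
--             "max": {"x": 0, "y": 0, "z": 0},
--             "dimensions": {"width": 0, "height": 0, "depth": 0},
--         }
--     x0, y0, z0 = all_positions[0][0], all_positions[0][1], all_positions[0][2]
--     min_x = max_x = x0
--     min_y = max_y = y0
--     min_z = max_z = z0
--     for pos in all_positions[1:]:
--         x, y, z = pos[0], pos[1], pos[2]
--         if x < min_x: min_x = x
--         if x > max_x: max_x = x
--         if y < min_y: min_y = y
--         if y > max_y: max_y = y
--         if z < min_z: min_z = z
--         if z > max_z: max_z = z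
--     return {
--         "min": {"x": min_x, "y": min_y, "z": min_z},
--         "max": {"x": max_x, "y": max_y, "z": max_z},
--         "dimensions": {
--             "width": max_x - min_x,
--             "height": max_y - min_y,
--             "depth": max_z - min_z,
--         },
--     }
-- ===== Notes on version B (the rewrite author's own statement) =====
-- stated objective: simpler
-- what changed: Replaces the three list comprehensions plus six separate min()/max() scans with one loop over the points maintaining six running extrema seeded from the first point.
import Mathlib
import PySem

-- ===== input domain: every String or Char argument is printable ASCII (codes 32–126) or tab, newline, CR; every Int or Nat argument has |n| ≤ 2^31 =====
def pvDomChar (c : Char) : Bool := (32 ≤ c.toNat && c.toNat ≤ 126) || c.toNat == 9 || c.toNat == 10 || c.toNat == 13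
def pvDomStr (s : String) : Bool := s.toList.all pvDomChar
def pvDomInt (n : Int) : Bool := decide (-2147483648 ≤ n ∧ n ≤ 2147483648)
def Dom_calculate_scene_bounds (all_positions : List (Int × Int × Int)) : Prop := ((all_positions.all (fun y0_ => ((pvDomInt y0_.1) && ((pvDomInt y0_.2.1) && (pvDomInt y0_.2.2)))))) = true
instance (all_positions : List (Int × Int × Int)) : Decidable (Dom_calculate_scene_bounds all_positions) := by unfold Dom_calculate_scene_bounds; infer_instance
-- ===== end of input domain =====

-- ===== PORT A =====
-- B computes the same bounds in one pass with six running extrema instead of three comprehensions plus six min/max scans.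
def pvZeroBounds : List (String × List (String × Int)) :=
  [("min", [("x", 0), ("y", 0), ("z", 0)]),
   ("max", [("x", 0), ("y", 0), ("z", 0)]),
   ("dimensions", [("width", 0), ("height", 0), ("depth", 0)])]

def pvBounds (min_x max_x min_y max_y min_z max_z : Int) : List (String × List (String × Int)) :=
  [("min", [("x", min_x), ("y", min_y), ("z", min_z)]),
   ("max", [("x", max_x), ("y", max_y), ("z", max_z)]),
   ("dimensions", [("width", max_x - min_x), ("height", max_y - min_y), ("depth", max_z - min_z)])]

def calculate_scene_bounds (all_positions : List (Int × Int × Int)) : List (String × List (String × Int)) :=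
  if all_positions = [] then pvZeroBounds
  else
    let xs := all_positions.map (fun pos => pos.1)
    let ys := all_positions.map (fun pos => pos.2.1)
    let zs := all_positions.map (fun pos => pos.2.2)
    -- min/max on a nonempty list always return some; .getD 0 is unreachable default
    let min_x := (PySem.List.min? xs (fun v => v)).getD 0
    let max_x := (PySem.List.max? xs (fun v => v)).getD 0
    let min_y := (PySem.List.min? ys (fun v => v)).getD 0
    let max_y := (PySem.List.max? ys (fun v => v)).getD 0
    let min_z := (PySem.List.min? zs (fun v => v)).getD 0
    let max_z := (PySem.List.max? zs (fun v => v)).getD 0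
    pvBounds min_x max_x min_y max_y min_z max_z

-- ===== PORT B =====
def pvStep (s : Int × Int × Int × Int × Int × Int) (p : Int × Int × Int) :
    Int × Int × Int × Int × Int × Int :=
  ((if p.1 < s.1 then p.1 else s.1),
   (if p.1 > s.2.1 then p.1 else s.2.1),
   (if p.2.1 < s.2.2.1 then p.2.1 else s.2.2.1),
   (if p.2.1 > s.2.2.2.1 then p.2.1 else s.2.2.2.1),
   (if p.2.2 < s.2.2.2.2.1 then p.2.2 else s.2.2.2.2.1),
   (if p.2.2 > s.2.2.2.2.2 then p.2.2 else s.2.2.2.2.2))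

def calculate_scene_bounds_alt (all_positions : List (Int × Int × Int)) : List (String × List (String × Int)) :=
  match all_positions with
  | [] => pvZeroBounds
  | (x0, y0, z0) :: rest =>
    let st := rest.foldl pvStep (x0, x0, y0, y0, z0, z0)
    pvBounds st.1 st.2.1 st.2.2.1 st.2.2.2.1 st.2.2.2.2.1 st.2.2.2.2.2

-- ===== PRECONDITION & SPEC =====
def Spec_calculate_scene_bounds (all_positions : List (Int × Int × Int)) (out : List (String × List (String × Int))) : Prop := out = calculate_scene_bounds_alt all_positions
instance (all_positions : List (Int × Int × Int)) (out : List (String × List (String × Int))) : Decidable (Spec_calculate_scene_bounds all_positions out) := by unfold Spec_calculate_scene_bounds; infer_instance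

-- ===== CLAIM (what is proved, stated in full; the proofs are below) =====
def Claim_equal_calculate_scene_bounds : Prop := ∀ (all_positions : List (Int × Int × Int)), Dom_calculate_scene_bounds all_positions → Spec_calculate_scene_bounds all_positions (calculate_scene_bounds all_positions)

-- ===== LEMMAS AND PROOFS =====

theorem pv_if_lt_min (x a : Int) : (if x < a then x else a) = min a x := by omega

theorem pv_if_gt_max (x a : Int) : (if x > a then x else a) = max a x := by omega

theorem pv_foldl_step (rest : List (Int × Int × Int)) (a b c d e f : Int) :
    rest.foldl pvStep (a, b, c, d, e, f) =
      ((rest.map (fun p => p.1)).foldl min a,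
       (rest.map (fun p => p.1)).foldl max b,
       (rest.map (fun p => p.2.1)).foldl min c,
       (rest.map (fun p => p.2.1)).foldl max d,
       (rest.map (fun p => p.2.2)).foldl min e,
       (rest.map (fun p => p.2.2)).foldl max f) := by
  induction rest generalizing a b c d e f with
  | nil => rfl
  | cons p t ih =>
    simp only [List.foldl_cons, List.map_cons, pvStep, pv_if_lt_min, pv_if_gt_max]
    exact ih _ _ _ _ _ _

-- ===== VERDICT (by name: the statement is the Claim_ definition above) =====
theorem calculate_scene_bounds_spec : Claim_equal_calculate_scene_bounds := by
  intro ps _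
  unfold Spec_calculate_scene_bounds calculate_scene_bounds calculate_scene_bounds_alt
  match ps with
  | [] => rfl
  | (x0, y0, z0) :: rest =>
    simp only [List.map_cons, PySem.List.min?_id_cons, PySem.List.max?_id_cons,
      Option.getD_some, pv_foldl_step]
    simp
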